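-- pv_equiv track=rewrite | github.com/crytic/tealer | tealer/printers/transaction_context.py | _repr_num_list
-- ===== SOURCE A (Python) =====
-- from typing import List, TYPE_CHECKING
--
-- def _repr_num_list(values: List[int]) -> str:
--     """Return short string representation of range of integers.
--
--     intergers are space-separated and represented in ascending order.
--
--     Continous sequence of more than 3 integers are represented using short-form(a..b).
--     e.g
--         5 6 7 8
--        => 5..8
--
--         1 2 3 5 6 7 8 9 11 13 14 15 16
--        => 1 2 3 5..9 11 13..16
--
--     Args:
--         values: Sorted list of integers. smaller value is first.
--
--     Returns:
--         Returns short string representation of the :values: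
--     """
--     values = sorted(values)
--     sequences: List[List[int]] = [[]]
--     for i in values:
--         if not sequences[-1]:
--             sequences[-1].append(i)
--         elif sequences[-1][-1] == (i - 1):
--             sequences[-1].append(i)
--         else:
--             sequences.append([i])
--     str_seqs = []
--     for seq in sequences:
--         if len(seq) >= 4:
--             str_seqs.append(f"{seq[0]}..{seq[-1]}")
--         else:
--             str_seqs.append(" ".join(str(i) for i in seq))
--     return " ".join(str_seqs)
-- ===== SOURCE B (Python) =====
-- def _repr_num_list(values):
--     # Staged passes: sort; compute the cut indices where the arithmetic key
--     # v - index changes (constant within a maximal consecutive run); slice the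
--     # sorted list at those cut points; format each slice independently.
--     vals = sorted(values)
--     n = len(vals)
--     cuts = [i for i in range(1, n) if vals[i] - i != vals[i - 1] - (i - 1)]
--     bounds = [0] + cuts + [n]
--     groups = [vals[a:b] for a, b in zip(bounds, bounds[1:])]
--     return " ".join(_fmt(g) for g in groups)
--
--
-- def _fmt(g):
--     if len(g) >= 4:
--         return f"{g[0]}..{g[-1]}"
--     return " ".join(str(v) for v in g)
-- ===== Notes on version B (the rewrite author's own statement) =====
-- stated objective: alternative
-- what changed: B replaces A's single stateful sweep that grows a list-of-lists accumulator by staged passes with no run-extension state: it computes the cut indices where the arithmetic key v - index changes over range(1, n), slices the sorted list at those cut points, and formats each slice independently.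
import Mathlib
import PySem

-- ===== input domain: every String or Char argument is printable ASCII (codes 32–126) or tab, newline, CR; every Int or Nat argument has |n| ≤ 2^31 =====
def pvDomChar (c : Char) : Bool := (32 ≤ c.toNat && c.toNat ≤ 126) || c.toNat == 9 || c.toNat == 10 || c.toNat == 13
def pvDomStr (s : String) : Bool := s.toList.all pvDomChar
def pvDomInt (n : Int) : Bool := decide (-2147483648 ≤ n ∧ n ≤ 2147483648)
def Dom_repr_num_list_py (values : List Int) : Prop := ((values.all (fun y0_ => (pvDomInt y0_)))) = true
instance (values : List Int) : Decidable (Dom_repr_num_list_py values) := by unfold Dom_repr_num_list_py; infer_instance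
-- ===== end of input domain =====

-- B replaces A's stateful sweep (list-of-lists accumulator) by staged passes: compute the
-- cut indices where the key v - index changes, slice the sorted list there, format each
-- slice (objective: alternative; same asymptotic cost).

-- ===== PORT A =====
-- one loop step: append i to the last sequence, or start a new one (Python mutates sequences[-1] in place)
def pvStepA (sequences : List (List Int)) (i : Int) : List (List Int) :=
  match sequences.getLast? with
  | none => sequences ++ [[i]]   -- unreachable: sequences starts [[]] and never shrinks
  | some last =>
    if last = [] then sequences.dropLast ++ [last ++ [i]]
    else if last.getLastD 0 = i - 1 then sequences.dropLast ++ [last ++ [i]]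
    else sequences ++ [[i]]

-- formatting of one seq (A's second loop body); seq[0] / seq[-1] are in range when taken
def pvFmtA (seq : List Int) : String :=
  if 4 ≤ seq.length then
    PySem.Str.join "" [PySem.Int.toStr (seq.headD 0), "..", PySem.Int.toStr (seq.getLastD 0)]
  else
    PySem.Str.join " " (seq.map PySem.Int.toStr)

def repr_num_list_py (values : List Int) : String :=
  let values := PySem.List.sorted values (fun x => x) false
  let sequences := values.foldl pvStepA [[]]
  let str_seqs := sequences.map pvFmtA
  PySem.Str.join " " str_seqs

-- ===== PORT B =====
-- _fmt of Source B
def pvFmtB (g : List Int) : String :=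
  if 4 ≤ g.length then
    PySem.Str.join "" [PySem.Int.toStr (g.headD 0), "..", PySem.Int.toStr (g.getLastD 0)]
  else
    PySem.Str.join " " (g.map PySem.Int.toStr)

def repr_num_list_py_alt (values : List Int) : String :=
  let vals := PySem.List.sorted values (fun x => x) false
  let n : Int := vals.length
  let cuts := (PySem.List.pyRange 1 n 1).filter
      (fun i => decide (PySem.List.pyGetD vals i 0 - i ≠ PySem.List.pyGetD vals (i - 1) 0 - (i - 1)))
  let bounds := 0 :: (cuts ++ [n])
  let groups := (bounds.zip bounds.tail).map
      (fun ab => PySem.List.slice vals (some ab.1) (some ab.2))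
  PySem.Str.join " " (groups.map pvFmtB)

-- ===== PRECONDITION & SPEC =====
def Spec_repr_num_list_py (values : List Int) (out : String) : Prop := out = repr_num_list_py_alt values
instance (values : List Int) (out : String) : Decidable (Spec_repr_num_list_py values out) := by unfold Spec_repr_num_list_py; infer_instance

-- ===== CLAIM (what is proved, stated in full; the proofs are below) =====
def Claim_equal_repr_num_list_py : Prop := ∀ (values : List Int), Dom_repr_num_list_py values → Spec_repr_num_list_py values (repr_num_list_py values)

-- ===== LEMMAS AND PROOFS =====

-- A's grouping, continued from current (nonempty) group g
def pvCont (g : List Int) : List Int → List (List Int)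
  | [] => [g]
  | v :: vs => if g.getLastD 0 = v - 1 then pvCont (g ++ [v]) vs else g :: pvCont [v] vs

lemma pvStepA_concat (gs : List (List Int)) (g : List Int) (hg : g ≠ []) (v : Int) :
    pvStepA (gs ++ [g]) v =
      if g.getLastD 0 = v - 1 then gs ++ [g ++ [v]] else (gs ++ [g]) ++ [[v]] := by
  simp [pvStepA, hg]

lemma pvFoldA (vs : List Int) : ∀ (gs : List (List Int)) (g : List Int), g ≠ [] →
    vs.foldl pvStepA (gs ++ [g]) = gs ++ pvCont g vs := by
  induction vs with
  | nil => intro gs g hg; simp [pvCont]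
  | cons v vs ih =>
    intro gs g hg
    rw [List.foldl_cons, pvStepA_concat gs g hg v]
    by_cases h : g.getLastD 0 = v - 1
    · simp only [h, pvCont]
      exact ih gs (g ++ [v]) (by simp)
    · simp only [if_neg h, pvCont]
      rw [show (gs ++ [g]) ++ [[v]] = (gs ++ [g]) ++ [[v]] from rfl,
        ih (gs ++ [g]) [v] (by simp)]
      simp

-- B's cut indices, abstractly: prev is the element before position i, t the rest of the list
def pvGo (i prev : Int) : List Int → List Int
  | [] => []
  | b :: t => if b = prev + 1 then pvGo (i + 1) b t else i :: pvGo (i + 1) b t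

-- the filter over range(1, n) computes pvGo
lemma pvCuts (t : List Int) : ∀ (pre : List Int) (hpre : pre ≠ []),
    (PySem.List.pyRange (pre.length : Int) (((pre ++ t).length : Nat) : Int) 1).filter
      (fun i => decide (PySem.List.pyGetD (pre ++ t) i 0 - i ≠
        PySem.List.pyGetD (pre ++ t) (i - 1) 0 - (i - 1)))
    = pvGo (pre.length : Int) (pre.getLast hpre) t := by
  induction t with
  | nil =>
    intro pre hpre
    rw [PySem.List.pyRange_one_eq_nil (by simp)]
    simp [pvGo]
  | cons b t ih =>
    intro pre hpre
    rw [PySem.List.pyRange_one_cons (by simp), List.filter_cons]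
    have h1 : PySem.List.pyGetD (pre ++ b :: t) (pre.length : Int) 0 = b := by
      simp [List.getD]
    have h0 : PySem.List.pyGetD (pre ++ b :: t) ((pre.length : Int) - 1) 0 = pre.getLast hpre := by
      have hl : 0 < pre.length := List.length_pos_iff.mpr hpre
      have hc : ((pre.length : Int) - 1) = ((pre.length - 1 : Nat) : Int) := by omega
      rw [hc, PySem.List.pyGetD_natCast, List.getD,
        List.getElem?_append_left (by omega), List.getLast_eq_getElem,
        List.getElem?_eq_getElem (by omega)]
      rfl
    have hcond : (decide (PySem.List.pyGetD (pre ++ b :: t) (pre.length : Int) 0 - (pre.length : Int) ≠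
        PySem.List.pyGetD (pre ++ b :: t) ((pre.length : Int) - 1) 0 - ((pre.length : Int) - 1)) = true)
        ↔ ¬ (b = pre.getLast hpre + 1) := by
      rw [decide_eq_true_eq, h1, h0]
      constructor <;> (intro h hc2; exact h (by omega))
    have hrec := ih (pre ++ [b]) (by simp)
    have hlen : ((pre ++ [b]).length : Int) = (pre.length : Int) + 1 := by simp
    have hlast : (pre ++ [b]).getLast (by simp) = b := by simp
    have hl2 : ((pre ++ [b]) ++ t) = pre ++ b :: t := by simp
    rw [hlen, hlast, hl2] at hrec
    by_cases hb : b = pre.getLast hpre + 1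
    · rw [if_neg (fun hc2 => (hcond.mp hc2) hb)]
      simp only [pvGo, if_pos hb]
      exact hrec
    · rw [if_pos (hcond.mpr hb)]
      simp only [pvGo, if_neg hb]
      rw [hrec]

-- the group picked out between two consecutive bounds
lemma pvSliceGroup (pre mid rest : List Int) :
    PySem.List.slice (pre ++ mid ++ rest) (some (pre.length : Int))
      (some ((pre.length + mid.length : Nat) : Int)) = mid := by
  rw [PySem.List.slice_natCast, List.append_assoc, List.drop_left]
  simp

-- slices of l at bounds (s :: pvGo … ++ [n]) are exactly pvCont's groups
lemma pvSlices (t : List Int) : ∀ (pre mid : List Int), mid ≠ [] →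
    (((pre.length : Int) :: (pvGo ((pre.length + mid.length : Nat) : Int) (mid.getLastD 0) t
        ++ [((pre ++ mid ++ t).length : Int)])).zip
      (pvGo ((pre.length + mid.length : Nat) : Int) (mid.getLastD 0) t
        ++ [((pre ++ mid ++ t).length : Int)])).map
      (fun ab => PySem.List.slice (pre ++ mid ++ t) (some ab.1) (some ab.2))
    = pvCont mid t := by
  induction t with
  | nil =>
    intro pre mid hmid
    have h := pvSliceGroup pre mid []
    simp only [pvGo, pvCont, List.nil_append, List.append_nil, List.zip_cons_cons,
      List.zip_nil_right, List.map_cons, List.map_nil, List.length_append]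
    rw [show ((pre.length + mid.length : Nat) : Int) = ((pre ++ mid).length : Int) by simp] at h ⊢
    rw [List.append_nil] at h
    rw [h]
  | cons b t ih =>
    intro pre mid hmid
    by_cases hb : b = mid.getLastD 0 + 1
    · simp only [pvGo, if_pos hb, pvCont, if_pos (show mid.getLastD 0 = b - 1 by omega)]
      have h := ih pre (mid ++ [b]) (by simp)
      simp only [List.getLastD_concat, List.length_append, List.length_cons,
        List.length_nil, List.append_assoc, List.cons_append, List.nil_append] at h ⊢
      have hc : ((pre.length + (mid.length + 1) : Nat) : Int)
          = ((pre.length + mid.length : Nat) : Int) + 1 := by push_cast; ring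
      rw [hc] at h
      exact h
    · simp only [pvGo, if_neg hb, pvCont, if_neg (show ¬ mid.getLastD 0 = b - 1 by omega)]
      rw [List.cons_append, List.zip_cons_cons, List.map_cons]
      have h := ih (pre ++ mid) [b] (by simp)
      rw [show [b].getLastD 0 = b from rfl] at h
      simp only [List.length_append, List.length_cons,
        List.length_nil, List.append_assoc, List.cons_append, List.nil_append] at h
      have hc : ((pre.length + mid.length + 1 : Nat) : Int)
          = ((pre.length + mid.length : Nat) : Int) + 1 := by push_cast; ring
      rw [hc] at h
      congr 1
      · exact pvSliceGroup pre mid (b :: t)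
      · simp only [List.append_assoc, List.length_append, List.length_cons]
        convert h using 3

-- ===== VERDICT (by name: the statement is the Claim_ definition above) =====
theorem repr_num_list_py_spec : Claim_equal_repr_num_list_py := by
  intro values _
  unfold Spec_repr_num_list_py repr_num_list_py repr_num_list_py_alt
  cases hvs : PySem.List.sorted values (fun x => x) false with
  | nil => rfl
  | cons v vs =>
    have hA : (v :: vs).foldl pvStepA [[]] = pvCont [v] vs := by
      rw [List.foldl_cons, show pvStepA [[]] v = [] ++ [[v]] from rfl]
      exact pvFoldA vs [] [v] (by simp)
    have hcuts : List.filter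
        (fun i => decide (PySem.List.pyGetD (v :: vs) i 0 - i ≠
          PySem.List.pyGetD (v :: vs) (i - 1) 0 - (i - 1)))
        (PySem.List.pyRange 1 (((v :: vs).length : Nat) : Int) 1) = pvGo 1 v vs :=
      pvCuts vs [v] (by simp)
    have hsl : (((0 : Int) :: (pvGo 1 v vs ++ [(((v :: vs).length : Nat) : Int)])).zip
          (pvGo 1 v vs ++ [(((v :: vs).length : Nat) : Int)])).map
        (fun ab => PySem.List.slice (v :: vs) (some ab.1) (some ab.2)) = pvCont [v] vs :=
      pvSlices vs [] [v] (by simp)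
    simp only [List.foldl_cons] at hA ⊢
    rw [show pvStepA [[]] v = [[v]] from rfl] at hA ⊢
    rw [hA, List.tail_cons, hcuts, hsl]
    rfl
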